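-- pv_equiv track=rewrite | github.com/fpichl/ArduinoDungeon | convert.py | convert_to_sprite_bitmap
-- ===== SOURCE A (Python) =====
-- def convert_to_sprite_bitmap(image, islevel):
--     bitmap = []
--     cur_row = ''
--
--     index = 0
--     for pixel in image:
--         cur_row += ('1' if pixel == (255, 255, 255) else '0')
--         index += 1
--
--         if index >= 8:
--             index = 0
--             if islevel:
--                 bitmap.append(cur_row)
--             else:
--                 bitmap.append(cur_row[::-1]) # reverse row, bitmaps are drawn in reverse
--             cur_row = ''
--
--     # convert string with bits to hexadecimal ('10011' -> 0x13)
--     bitmap = [hex(int(num, 2)) for num in bitmap]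
--
--     # make sure redundant zeros are present (0x7 -> 0x07)
--     bitmap = ['0x0' + num[-1] if len(num) == 3 else num for num in bitmap]
--
--     # convert list to nicely styled line
--     bitmap = str(bitmap)
--     bitmap = bitmap.replace("'", "").replace("[", "{").replace("]", "}")
--
--     return bitmap
-- ===== SOURCE B (Python) =====
-- def convert_to_sprite_bitmap(image, islevel):
--     px = list(image)
--     parts = []
--     for start in range(0, len(px) - len(px) % 8, 8):
--         chunk = px[start:start + 8]
--         val = 0
--         for i, p in enumerate(chunk):
--             bit = 1 if p == (255, 255, 255) else 0
--             val += bit << ((7 - i) if islevel else i)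
--         parts.append("0x%02x" % val)
--     return "{" + ", ".join(parts) + "}"
-- ===== Notes on version B (the rewrite author's own statement) =====
-- stated objective: simpler
-- what changed: B folds each 8-pixel chunk directly into a byte value with bit shifts and formats it with '0x%02x', replacing A's bit-string accumulator, int(.,2)/hex() round-trip, zero-padding fix-up pass and str(list).replace post-processing with a single chunk loop plus join.
import Mathlib
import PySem

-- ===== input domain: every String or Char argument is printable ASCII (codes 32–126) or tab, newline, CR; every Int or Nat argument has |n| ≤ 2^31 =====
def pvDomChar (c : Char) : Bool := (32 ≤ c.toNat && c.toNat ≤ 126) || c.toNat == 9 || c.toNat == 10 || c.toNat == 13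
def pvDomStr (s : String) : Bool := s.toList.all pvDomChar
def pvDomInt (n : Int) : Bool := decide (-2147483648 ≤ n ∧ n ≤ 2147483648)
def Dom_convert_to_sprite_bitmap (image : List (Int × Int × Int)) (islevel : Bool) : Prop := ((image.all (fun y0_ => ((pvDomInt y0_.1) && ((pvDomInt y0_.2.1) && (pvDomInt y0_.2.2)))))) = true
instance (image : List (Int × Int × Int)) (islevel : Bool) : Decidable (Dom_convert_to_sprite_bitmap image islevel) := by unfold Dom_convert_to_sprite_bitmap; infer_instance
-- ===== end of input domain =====

-- B replaces A's bit-string / int(.,2) / hex() / padding / str(list).replace pipeline by folding each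
-- 8-pixel chunk directly into a byte value and joining "0x%02x" strings; objective: simpler.
-- Strings are modelled as List Char (PySem.Chars style) and packed with String.mk at the end.

-- ===== PORT A =====

-- the for-loop of A: state (bitmap, cur_row, index); cur_row[::-1] on a char list is List.reverse (exact)
def aLoop (islevel : Bool) : List (Int × Int × Int) → List (List Char) → List Char → Int → List (List Char)
  | [], bitmap, _, _ => bitmap
  | p :: rest, bitmap, cur_row, index =>
    let cur_row := cur_row ++ [if p = ((255 : Int), (255 : Int), (255 : Int)) then '1' else '0']
    let index := index + 1
    if index ≥ 8 then
      aLoop islevel rest (bitmap ++ [if islevel then cur_row else cur_row.reverse]) [] 0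
    else
      aLoop islevel rest bitmap cur_row index

-- int(num, 2): exact on the '0'/'1' strings A builds
def binToNat (num : List Char) : Nat := num.foldl (fun a c => 2 * a + (if c = '1' then 1 else 0)) 0

def hexDigitChar (n : Nat) : Char :=
  ['0','1','2','3','4','5','6','7','8','9','a','b','c','d','e','f'].getD n '0'

-- digit-collection loop of hex(); fuel bounds the while-loop (n+1 iterations always suffice)
def hexLoop : Nat → Nat → List Char → List Char
  | 0, _, acc => acc
  | fuel + 1, n, acc => if n = 0 then acc else hexLoop fuel (n / 16) (hexDigitChar (n % 16) :: acc)

-- hex(n) for n ≥ 0 (the only values A produces): '0x' + lowercase digits, hex(0) = '0x0'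
def hexRepr (n : Nat) : List Char := '0' :: 'x' :: (if n = 0 then ['0'] else hexLoop (n + 1) n [])

-- str(bitmap) body for a list of quote-free strings: "'s0', 's1', …" (exact repr of such a list)
def aReprItems : List (List Char) → List Char
  | [] => []
  | [x] => '\'' :: x ++ ['\'']
  | x :: y :: xs => ('\'' :: x ++ ['\'']) ++ ',' :: ' ' :: aReprItems (y :: xs)

def convert_to_sprite_bitmap (image : List (Int × Int × Int)) (islevel : Bool) : String :=
  let bitmap := aLoop islevel image [] [] 0
  let bitmap := bitmap.map (fun num => hexRepr (binToNat num))
  -- '0x0' + num[-1] when len(num) == 3; num[-1] of a length-3 list is num.drop 2 (exact here)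
  let bitmap := bitmap.map (fun num => if num.length = 3 then ['0','x','0'] ++ num.drop 2 else num)
  let line := '[' :: aReprItems bitmap ++ [']']
  let line := line.filter (fun c => c != '\'')                   -- .replace("'", "")  (single-char pattern: exact)
  let line := line.map (fun c => if c = '[' then '{' else c)     -- .replace("[", "{")
  let line := line.map (fun c => if c = ']' then '}' else c)     -- .replace("]", "}")
  String.mk line

-- ===== PORT B =====

-- the inner  for i, p in enumerate(chunk)  loop of Source B; (7 - i).toNat is exact since 0 ≤ i ≤ 7
def altByte (islevel : Bool) (chunk : List (Int × Int × Int)) : Nat :=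
  (PySem.List.enumerate chunk).foldl
    (fun val ip =>
      val + (if ip.2 = ((255 : Int), (255 : Int), (255 : Int)) then 1 else 0) <<<
        (if islevel then ((7 : Int) - ip.1).toNat else ip.1.toNat))
    0

-- "0x%02x" % val : exact for 0 ≤ val < 256, the only values produced (val is an 8-bit sum)
def fmtByte (val : Nat) : List Char := '0' :: 'x' :: [hexDigitChar (val / 16), hexDigitChar (val % 16)]

-- the chunk loop of Source B: take complete chunks of 8, drop the remainder
def altParts (islevel : Bool) : List (Int × Int × Int) → List (List Char)
  | p0 :: p1 :: p2 :: p3 :: p4 :: p5 :: p6 :: p7 :: rest =>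
      fmtByte (altByte islevel [p0, p1, p2, p3, p4, p5, p6, p7]) :: altParts islevel rest
  | _ => []

-- ", ".join(parts)
def pyJoin (sep : List Char) : List (List Char) → List Char
  | [] => []
  | [x] => x
  | x :: y :: xs => x ++ sep ++ pyJoin sep (y :: xs)

def convert_to_sprite_bitmap_alt (image : List (Int × Int × Int)) (islevel : Bool) : String :=
  String.mk ('{' :: pyJoin [',', ' '] (altParts islevel image) ++ ['}'])

-- ===== PRECONDITION & SPEC =====
def Spec_convert_to_sprite_bitmap (image : List (Int × Int × Int)) (islevel : Bool) (out : String) : Prop := out = convert_to_sprite_bitmap_alt image islevel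
instance (image : List (Int × Int × Int)) (islevel : Bool) (out : String) : Decidable (Spec_convert_to_sprite_bitmap image islevel out) := by unfold Spec_convert_to_sprite_bitmap; infer_instance

-- ===== CLAIM (what is proved, stated in full; the proofs are below) =====
def Claim_equal_convert_to_sprite_bitmap : Prop := ∀ (image : List (Int × Int × Int)) (islevel : Bool), Dom_convert_to_sprite_bitmap image islevel → Spec_convert_to_sprite_bitmap image islevel (convert_to_sprite_bitmap image islevel)

-- ===== LEMMAS AND PROOFS =====

-- the rows A's loop appends, as an 8-at-a-time recursion
def rowOf (islevel : Bool) (p0 p1 p2 p3 p4 p5 p6 p7 : Int × Int × Int) : List Char :=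
  let row := [p0, p1, p2, p3, p4, p5, p6, p7].map
      (fun p => if p = ((255 : Int), (255 : Int), (255 : Int)) then '1' else '0')
  if islevel then row else row.reverse

def chunkRowsA (islevel : Bool) : List (Int × Int × Int) → List (List Char)
  | p0 :: p1 :: p2 :: p3 :: p4 :: p5 :: p6 :: p7 :: rest =>
      rowOf islevel p0 p1 p2 p3 p4 p5 p6 p7 :: chunkRowsA islevel rest
  | _ => []

theorem aLoop_eq_chunkRows (islevel : Bool) :
    ∀ (n : Nat) (l : List (Int × Int × Int)), l.length ≤ n → ∀ bitmap,
      aLoop islevel l bitmap [] 0 = bitmap ++ chunkRowsA islevel l := by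
  intro n
  induction n with
  | zero =>
    intro l h bitmap
    rw [List.length_eq_zero_iff.mp (Nat.le_zero.mp h)]
    simp [aLoop, chunkRowsA]
  | succ n ih =>
    intro l h bitmap
    rcases l with _ | ⟨q0, _ | ⟨q1, _ | ⟨q2, _ | ⟨q3, _ | ⟨q4, _ | ⟨q5, _ | ⟨q6, _ | ⟨q7, rest⟩⟩⟩⟩⟩⟩⟩⟩ <;>
      norm_num [aLoop, chunkRowsA, rowOf]
    rw [ih rest (by simp at h; omega)]
    simp

def procA (num : List Char) : List Char :=
  (fun num => if num.length = 3 then ['0','x','0'] ++ num.drop 2 else num) (hexRepr (binToNat num))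

theorem perChunk (islevel : Bool) (p0 p1 p2 p3 p4 p5 p6 p7 : Int × Int × Int) :
    procA (rowOf islevel p0 p1 p2 p3 p4 p5 p6 p7)
    = fmtByte (altByte islevel [p0, p1, p2, p3, p4, p5, p6, p7]) := by
  simp only [rowOf, procA, altByte, PySem.List.enumerate_cons, PySem.List.enumerate_nil,
    List.foldl, List.map, List.reverse]
  simp only [← Bool.cond_decide]
  generalize decide (p0 = ((255 : Int), (255 : Int), (255 : Int))) = b0
  generalize decide (p1 = ((255 : Int), (255 : Int), (255 : Int))) = b1
  generalize decide (p2 = ((255 : Int), (255 : Int), (255 : Int))) = b2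
  generalize decide (p3 = ((255 : Int), (255 : Int), (255 : Int))) = b3
  generalize decide (p4 = ((255 : Int), (255 : Int), (255 : Int))) = b4
  generalize decide (p5 = ((255 : Int), (255 : Int), (255 : Int))) = b5
  generalize decide (p6 = ((255 : Int), (255 : Int), (255 : Int))) = b6
  generalize decide (p7 = ((255 : Int), (255 : Int), (255 : Int))) = b7
  revert b0 b1 b2 b3 b4 b5 b6 b7
  revert islevel
  decide

theorem rows_map_eq_altParts (islevel : Bool) :
    ∀ (n : Nat) (l : List (Int × Int × Int)), l.length ≤ n →
      (chunkRowsA islevel l).map procA = altParts islevel l := by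
  intro n
  induction n with
  | zero =>
    intro l h
    rw [List.length_eq_zero_iff.mp (Nat.le_zero.mp h)]
    simp [chunkRowsA, altParts]
  | succ n ih =>
    intro l h
    rcases l with _ | ⟨q0, _ | ⟨q1, _ | ⟨q2, _ | ⟨q3, _ | ⟨q4, _ | ⟨q5, _ | ⟨q6, _ | ⟨q7, rest⟩⟩⟩⟩⟩⟩⟩⟩ <;>
      simp only [chunkRowsA, altParts, List.map]
    rw [perChunk, ih rest (by simp at h; omega)]

def goodc (c : Char) : Prop := c ≠ '\'' ∧ c ≠ '[' ∧ c ≠ ']'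

theorem good_hexDigitChar (n : Nat) : goodc (hexDigitChar n) := by
  unfold goodc hexDigitChar
  by_cases h : n < 16
  · interval_cases n <;> decide
  · rw [List.getD_eq_default _ _ (by simp; omega)]
    decide

theorem good_fmtByte (val : Nat) : ∀ c ∈ fmtByte val, goodc c := by
  intro c hc
  simp only [fmtByte, List.mem_cons, List.not_mem_nil, or_false] at hc
  rcases hc with h | h | h | h <;> subst h
  · unfold goodc; decide
  · unfold goodc; decide
  · exact good_hexDigitChar _
  · exact good_hexDigitChar _

theorem assembly (parts : List (List Char)) (h : ∀ s ∈ parts, ∀ c ∈ s, goodc c) :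
    ((('[' :: aReprItems parts ++ [']']).filter (fun c => c != '\'')).map
        (fun c => if c = '[' then '{' else c)).map (fun c => if c = ']' then '}' else c)
    = '{' :: pyJoin [',', ' '] parts ++ ['}'] := by
  have e1 : (('\'' : Char) != '\'') = false := rfl
  have e2 : (((',' : Char)) != '\'') = true := rfl
  have e3 : (((' ' : Char)) != '\'') = true := rfl
  have e4 : ((('[' : Char)) != '\'') = true := rfl
  have e5 : (((']' : Char)) != '\'') = true := rfl
  have f1 : (if (',' : Char) = '[' then '{' else ',') = ',' := rfl
  have f2 : (if (' ' : Char) = '[' then '{' else ' ') = ' ' := rfl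
  have f3 : (if (',' : Char) = ']' then '}' else ',') = ',' := rfl
  have f4 : (if (' ' : Char) = ']' then '}' else ' ') = ' ' := rfl
  have f5 : (if ('[' : Char) = '[' then '{' else '[') = '{' := rfl
  have f6 : (if ('{' : Char) = ']' then '}' else '{') = '{' := rfl
  have f7 : (if (']' : Char) = '[' then '{' else ']') = ']' := rfl
  have f8 : (if (']' : Char) = ']' then '}' else ']') = '}' := rfl
  have good_id : ∀ (s : List Char), (∀ c ∈ s, goodc c) →
      ((s.filter (fun c => c != '\'')).map (fun c => if c = '[' then '{' else c)).map
        (fun c => if c = ']' then '}' else c) = s := by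
    intro s hs
    induction s with
    | nil => simp
    | cons c cs ih =>
      obtain ⟨h1, h2, h3⟩ := hs c (by simp)
      rw [List.filter_cons, if_pos (by simpa using h1), List.map_cons, List.map_cons,
        if_neg h2, if_neg h3, ih (fun d hd => hs d (by simp [hd]))]
  have inner : ∀ (parts : List (List Char)), (∀ s ∈ parts, ∀ c ∈ s, goodc c) →
      (((aReprItems parts).filter (fun c => c != '\'')).map (fun c => if c = '[' then '{' else c)).map
        (fun c => if c = ']' then '}' else c) = pyJoin [',', ' '] parts := by
    intro parts
    induction parts with
    | nil => intro _; simp [aReprItems, pyJoin]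
    | cons x xs ih =>
      intro hp
      cases xs with
      | nil =>
        simp only [aReprItems, pyJoin, List.cons_append, List.filter_cons, List.filter_append,
          e1, List.filter_nil, List.append_nil, if_false, Bool.false_eq_true]
        exact good_id x (hp x (by simp))
      | cons y ys =>
        simp only [aReprItems, pyJoin, List.cons_append, List.filter_cons, List.filter_append,
          e1, e2, e3, List.filter_nil, List.append_nil, if_false, if_true, Bool.false_eq_true,
          List.map_append, List.map_cons, f1, f2, f3, f4]
        rw [good_id x (hp x (by simp)), ih (fun s hs => hp s (by simp at hs ⊢; tauto))]
        simp [List.append_assoc]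
  simp only [List.cons_append, List.filter_cons, List.filter_append, e4, e5, if_true,
    List.filter_nil, List.map_append, List.map_cons, List.map_nil, f7]
  rw [inner parts h]
  simp

theorem good_altParts (islevel : Bool) :
    ∀ (n : Nat) (l : List (Int × Int × Int)), l.length ≤ n →
      ∀ s ∈ altParts islevel l, ∀ c ∈ s, goodc c := by
  intro n
  induction n with
  | zero =>
    intro l h
    rw [List.length_eq_zero_iff.mp (Nat.le_zero.mp h)]
    simp [altParts]
  | succ n ih =>
    intro l h s hs
    rcases l with _ | ⟨q0, _ | ⟨q1, _ | ⟨q2, _ | ⟨q3, _ | ⟨q4, _ | ⟨q5, _ | ⟨q6, _ | ⟨q7, rest⟩⟩⟩⟩⟩⟩⟩⟩ <;>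
      simp only [altParts, List.mem_cons, List.not_mem_nil] at hs <;>
      try exact hs.elim
    rcases hs with rfl | hs
    · exact good_fmtByte _
    · exact ih rest (by simp at h; omega) s hs

-- ===== VERDICT (by name: the statement is the Claim_ definition above) =====
theorem convert_to_sprite_bitmap_spec : Claim_equal_convert_to_sprite_bitmap := by
  intro image islevel _
  unfold Spec_convert_to_sprite_bitmap convert_to_sprite_bitmap convert_to_sprite_bitmap_alt
  rw [aLoop_eq_chunkRows islevel image.length image le_rfl []]
  dsimp only
  rw [List.nil_append]
  have key : List.map (fun num => if num.length = 3 then ['0','x','0'] ++ List.drop 2 num else num)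
      (List.map (fun num => hexRepr (binToNat num)) (chunkRowsA islevel image))
      = altParts islevel image := by
    rw [List.map_map]
    exact rows_map_eq_altParts islevel image.length image le_rfl
  rw [key, assembly _ (good_altParts islevel image.length image le_rfl)]
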